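-- pv_equiv track=rewrite | github.com/gutdraw/openclaw-aave-leverage-strategy | bot/signer.py | _split_sig_types
-- ===== SOURCE A (Python) =====
-- def _split_sig_types(sig: str) -> list[str]:
--     """
--     Parse parameter types from a function signature or tuple type string,
--     correctly handling nested tuples.
--
--       "approve(address,uint256)"
--           → ["address", "uint256"]
--       "exactInputSingle((address,address,uint24,address,uint256,uint256,uint160))"
--           → ["(address,address,uint24,address,uint256,uint256,uint160)"]
--       "(address,address,uint24)"
--           → ["address", "address", "uint24"]
--     """
--     start = sig.index("(") + 1
--     end   = sig.rindex(")")
--     inner = sig[start:end]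
--     if not inner:
--         return []
--     types: list[str] = []
--     depth   = 0
--     current = ""
--     for ch in inner:
--         if ch == "(":
--             depth += 1
--             current += ch
--         elif ch == ")":
--             depth -= 1
--             current += ch
--         elif ch == "," and depth == 0:
--             types.append(current.strip())
--             current = ""
--         else:
--             current += ch
--     if current:
--         types.append(current.strip())
--     return types
-- ===== SOURCE B (Python) =====
-- def _top_comma(s):
--     depth = 0
--     for i, ch in enumerate(s):
--         if ch == "(":
--             depth += 1
--         elif ch == ")":
--             depth -= 1
--         elif ch == "," and depth == 0:
--             return i
--     return None
--
--
-- def _split_sig_types(sig: str) -> list[str]: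
--     start = sig.index("(") + 1
--     end = sig.rindex(")")
--     inner = sig[start:end]
--     if not inner:
--         return []
--     segs = []
--     while True:
--         i = _top_comma(inner)
--         if i is None:
--             break
--         segs.append(inner[:i])
--         inner = inner[i + 1:]
--     if inner:
--         segs.append(inner)
--     return [s.strip() for s in segs]
-- ===== Notes on version B (the rewrite author's own statement) =====
-- stated objective: alternative
-- what changed: Replaces A's single fold that accumulates characters into a buffer (stripping at each depth-0 comma) by repeated find-next-top-level-comma + slice into raw segments, with the strip applied in one final map over the segments.
import Mathlib
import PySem

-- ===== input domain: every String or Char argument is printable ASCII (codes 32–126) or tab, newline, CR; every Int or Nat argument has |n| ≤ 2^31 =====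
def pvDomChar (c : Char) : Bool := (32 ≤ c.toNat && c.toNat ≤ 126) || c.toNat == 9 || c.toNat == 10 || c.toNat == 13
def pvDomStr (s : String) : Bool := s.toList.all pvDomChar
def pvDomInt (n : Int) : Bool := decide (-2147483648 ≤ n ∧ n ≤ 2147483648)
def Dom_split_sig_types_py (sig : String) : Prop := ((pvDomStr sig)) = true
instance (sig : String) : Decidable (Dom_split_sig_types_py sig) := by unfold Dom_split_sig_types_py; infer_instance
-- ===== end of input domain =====

-- B replaces A's single character-accumulator fold by repeated find-next-top-level-comma + slice,
-- with the strip applied in one final map (objective: alternative decomposition, same cost).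

-- ===== PORT A =====
-- the for-ch-in-inner loop with state (types, depth, current); current.strip() via PySem.Chars.strip
def pvALoop : List Char → Int → List Char → List String → List String
  | [], _, current, types =>
      if current ≠ [] then types ++ [String.ofList (PySem.Chars.strip current)] else types
  | ch :: rest, depth, current, types =>
      if ch = '(' then pvALoop rest (depth + 1) (current ++ [ch]) types
      else if ch = ')' then pvALoop rest (depth - 1) (current ++ [ch]) types
      else if ch = ',' ∧ depth = 0 then
        pvALoop rest depth [] (types ++ [String.ofList (PySem.Chars.strip current)])
      else pvALoop rest depth (current ++ [ch]) types

def split_sig_types_py (sig : String) : List String :=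
  let cs := sig.toList
  let start := PySem.Chars.find cs ['('] + 1      -- sig.index("(") + 1 (Pre_: "(" occurs)
  let stop := PySem.Chars.rfind cs [')']          -- sig.rindex(")")   (Pre_: ")" occurs)
  let inner := PySem.List.slice cs (some start) (some stop)
  if inner = [] then [] else pvALoop inner 0 [] []

-- ===== PORT B =====
-- _top_comma: index of the first depth-0 comma (None = not found)
def pvTopComma : List Char → Int → Option Nat
  | [], _ => none
  | ch :: rest, depth =>
      if ch = ',' ∧ depth = 0 then some 0
      else (pvTopComma rest
              (if ch = '(' then depth + 1 else if ch = ')' then depth - 1 else depth)).map (· + 1)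

theorem pvTopComma_lt : ∀ (cs : List Char) (d : Int) (i : Nat),
    pvTopComma cs d = some i → i < cs.length := by
  intro cs
  induction cs with
  | nil => intro d i h; simp [pvTopComma] at h
  | cons ch rest ih =>
      intro d i h
      simp only [pvTopComma] at h
      split at h
      · cases h; simp
      · simp only [Option.map_eq_some_iff] at h
        obtain ⟨j, hj, rfl⟩ := h
        have := ih _ _ hj
        simp; omega

-- the while loop: chop off the segment before each top-level comma; keep the final piece if nonempty
def pvSplitSegs (cs : List Char) : List (List Char) :=
  match h : pvTopComma cs 0 with
  | none => if cs = [] then [] else [cs]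
  | some i => cs.take i :: pvSplitSegs (cs.drop (i + 1))
termination_by cs.length
decreasing_by
  have := pvTopComma_lt cs 0 i h
  simp; omega

def split_sig_types_py_alt (sig : String) : List String :=
  let cs := sig.toList
  let start := PySem.Chars.find cs ['('] + 1
  let stop := PySem.Chars.rfind cs [')']
  let inner := PySem.List.slice cs (some start) (some stop)
  if inner = [] then []
  else (pvSplitSegs inner).map (fun s => String.ofList (PySem.Chars.strip s))

-- ===== PRECONDITION & SPEC =====
-- A raises ValueError (from str.index / str.rindex) when "(" or ")" does not occur in sig
def Pre_split_sig_types_py (sig : String) : Prop :=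
  PySem.Str.isIn "(" sig = true ∧ PySem.Str.isIn ")" sig = true
instance (sig : String) : Decidable (Pre_split_sig_types_py sig) := by
  unfold Pre_split_sig_types_py; infer_instance

def pvWitness_split_sig_types_py : String := "approve(address,uint256)"

def Spec_split_sig_types_py (sig : String) (out : List String) : Prop := out = split_sig_types_py_alt sig
instance (sig : String) (out : List String) : Decidable (Spec_split_sig_types_py sig out) := by unfold Spec_split_sig_types_py; infer_instance

-- ===== CLAIM (what is proved, stated in full; the proofs are below) =====
def Claim_equal_split_sig_types_py : Prop := ∀ (sig : String), Dom_split_sig_types_py sig → Pre_split_sig_types_py sig → Spec_split_sig_types_py sig (split_sig_types_py sig)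

-- ===== LEMMAS AND PROOFS =====

theorem pvSplitSegs_none {cs : List Char} (htc : pvTopComma cs 0 = none) :
    pvSplitSegs cs = if cs = [] then [] else [cs] := by
  rw [pvSplitSegs]; split <;> simp_all

theorem pvSplitSegs_some {cs : List Char} {i : Nat} (htc : pvTopComma cs 0 = some i) :
    pvSplitSegs cs = cs.take i :: pvSplitSegs (cs.drop (i + 1)) := by
  rw [pvSplitSegs]; split <;> simp_all

-- One step of A's fold, phrased through pvTopComma: A consumes up to the first depth-0 comma,
-- emitting (current ++ chars before the comma).strip(), then restarts at depth 0 with empty current.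
theorem pvALoop_step : ∀ (cs : List Char) (depth : Int) (current : List Char) (types : List String),
    pvALoop cs depth current types =
      match pvTopComma cs depth with
      | some i => pvALoop (cs.drop (i + 1)) 0 []
          (types ++ [String.ofList (PySem.Chars.strip (current ++ cs.take i))])
      | none =>
          if current ++ cs = [] then types
          else types ++ [String.ofList (PySem.Chars.strip (current ++ cs))] := by
  intro cs
  induction cs with
  | nil =>
      intro depth current types
      simp only [pvTopComma, pvALoop, List.append_nil]
      by_cases h : current = [] <;> simp [h]
  | cons ch rest ih =>
      intro depth current types
      simp only [pvTopComma, pvALoop]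
      by_cases hc : ch = ',' ∧ depth = 0
      · obtain ⟨rfl, rfl⟩ := hc
        simp
      · have hch : ¬ (ch = ',' ∧ depth = 0) := hc
        simp only [if_neg hch]
        by_cases h1 : ch = '('
        · subst h1
          simp only [ih]
          cases htc : pvTopComma rest (depth + 1) with
          | none => simp [htc, List.append_assoc]
          | some j => simp [htc, List.append_assoc]
        · simp only [if_neg h1]
          by_cases h2 : ch = ')'
          · subst h2
            simp only [ih]
            cases htc : pvTopComma rest (depth - 1) with
            | none => simp [htc, List.append_assoc]
            | some j => simp [htc, List.append_assoc]
          · simp only [if_neg h2, ih]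
            cases htc : pvTopComma rest depth with
            | none => simp [List.append_assoc]
            | some j => simp [List.append_assoc]

-- A's fold from a fresh state equals B's segment list, stripped and appended to the accumulator.
theorem pvALoop_eq_splitSegs : ∀ (n : Nat) (cs : List Char), cs.length ≤ n → ∀ (types : List String),
    pvALoop cs 0 [] types = types ++ (pvSplitSegs cs).map (fun s => String.ofList (PySem.Chars.strip s)) := by
  intro n
  induction n with
  | zero =>
      intro cs hlen types
      have : cs = [] := by cases cs <;> simp_all
      subst this
      rw [pvSplitSegs_none rfl]
      simp [pvALoop]
  | succ n ih =>
      intro cs hlen types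
      rw [pvALoop_step]
      cases htc : pvTopComma cs 0 with
      | none =>
          rw [pvSplitSegs_none htc]
          by_cases hnil : cs = []
          · subst hnil; simp
          · simp [hnil]
      | some i =>
          have hi := pvTopComma_lt cs 0 i htc
          rw [pvSplitSegs_some htc]
          simp only []
          rw [ih (cs.drop (i + 1)) (by simp; omega)]
          simp [List.append_assoc]

-- ===== VERDICT (by name: the statement is the Claim_ definition above) =====
theorem split_sig_types_py_spec : Claim_equal_split_sig_types_py := by
  intro sig _ _
  unfold Spec_split_sig_types_py split_sig_types_py split_sig_types_py_alt
  simp only []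
  split
  · rfl
  · exact pvALoop_eq_splitSegs _ _ le_rfl []
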